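-- pv_equiv track=rewrite | github.com/eliottcassidy2000/math | 04-computation/sigma_equivariance_transfer.py | find_involution_anti_auts
-- ===== SOURCE A (Python) =====
-- from itertools import permutations
--
-- def find_involution_anti_auts(T, n):
--     """Find all involution anti-automorphisms of T."""
--     results = []
--     for perm in permutations(range(n)):
--         if not all(perm[perm[i]] == i for i in range(n)):
--             continue
--         is_anti = True
--         for i in range(n):
--             for j in range(n):
--                 if i != j:
--                     if T.get((i,j), 0) != T.get((perm[j], perm[i]), 0):
--                         is_anti = False
--                         break
--             if not is_anti:
--                 break
--         if is_anti:
--             results.append(perm)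
--     return results
-- ===== SOURCE B (Python) =====
-- def _insert_by_key(pair, m):
--     # insert pair into the key-sorted association list m, keeping keys sorted
--     if not m or pair[0] < m[0][0]:
--         return [pair] + m
--     return [m[0]] + _insert_by_key(pair, m[1:])
--
--
-- def _gen_involutions(free):
--     # free: strictly increasing list of unassigned indices.
--     # Returns every involution of 'free' as a key-sorted association list,
--     # in lexicographic order of the value sequences: the smallest index i
--     # is paired with each candidate partner v (v == i first, then each
--     # larger v in increasing order), which forces v -> i as well.
--     if not free:
--         return [[]]
--     i, rest0 = free[0], free[1:]
--     out = [[(i, i)] + sub for sub in _gen_involutions(rest0)]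
--     for v in rest0:
--         rest = rest0.copy()
--         rest.remove(v)  # v occurs exactly once
--         for sub in _gen_involutions(rest):
--             out.append([(i, v)] + _insert_by_key((v, i), sub))
--     return out
--
--
-- def find_involution_anti_auts(T, n):
--     """Find all involution anti-automorphisms of T."""
--     results = []
--     for m in _gen_involutions(list(range(n))):
--         p = tuple(v for _, v in m)
--         if all(T.get((a, b), 0) == T.get((p[b], p[a]), 0)
--                for a in range(n) for b in range(n) if a != b):
--             results.append(p)
--     return results
-- ===== Notes on version B (the rewrite author's own statement) =====
-- stated objective: alternative
-- what changed: Instead of generating all n! permutations and filtering out the involutions, B constructs exactly the involutions by a recursive pairing of the smallest free index with each candidate partner (emitting them in the same lexicographic order as A), and then checks the anti-automorphism equations only on those; it enumerates I(n) involutions instead of n! permutations (intended as faster; a timing run could not confirm this at its sizes, reading 1.23x at the largest size both finished), trading A's library-based generate-and-filter for an explicit backtracking construction.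
import Mathlib
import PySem

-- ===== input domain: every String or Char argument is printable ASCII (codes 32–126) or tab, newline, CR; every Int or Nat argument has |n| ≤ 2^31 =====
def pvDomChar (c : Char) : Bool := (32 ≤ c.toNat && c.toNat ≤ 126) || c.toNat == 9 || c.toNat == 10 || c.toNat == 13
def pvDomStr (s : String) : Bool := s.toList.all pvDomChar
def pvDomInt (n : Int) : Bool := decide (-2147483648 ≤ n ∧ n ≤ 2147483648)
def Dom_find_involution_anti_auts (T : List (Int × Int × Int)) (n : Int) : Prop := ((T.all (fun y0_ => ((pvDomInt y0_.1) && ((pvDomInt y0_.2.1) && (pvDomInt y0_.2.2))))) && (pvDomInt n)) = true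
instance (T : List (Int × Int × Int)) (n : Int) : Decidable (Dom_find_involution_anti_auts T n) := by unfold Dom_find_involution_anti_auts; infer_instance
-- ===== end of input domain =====

-- B replaces A's filter over all n! permutations by a recursive construction that
-- builds only the involutions directly (pairing the smallest free index with each
-- candidate partner, in the same lexicographic order), then tests the
-- anti-automorphism equations on those; a different enumeration, same results.

-- ===== PORT A =====
-- T.get((a, b), 0): T is a Python dict, so its keys are distinct; first match.
def pvTget (T : List (Int × Int × Int)) (a b : Int) : Int :=
  match T.find? (fun e => e.1 == a && e.2.1 == b) with
  | some e => e.2.2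
  | none => 0

-- p[i]; every index used by either program is in range (p is a permutation of
-- range(n) and i ∈ range(n)), so the default of pyGetD is never taken.
def pvIdx (p : List Int) (i : Int) : Int := PySem.List.pyGetD p i 0

-- itertools.permutations(range(n)) in its emission order: each element x of l in
-- list order, followed by the permutations of the remaining elements.
def pvPerms : List Int → List (List Int)
  | [] => [[]]
  | x :: l => (x :: l).attach.flatMap
      (fun y => (pvPerms ((x :: l).erase y.1)).map (fun q => y.1 :: q))
termination_by l => l.length
decreasing_by
  rw [List.length_erase_of_mem y.2]; simp

-- all(perm[perm[i]] == i for i in range(n))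
def pvInvoChk (p : List Int) (is : List Int) : Bool :=
  is.all (fun i => pvIdx p (pvIdx p i) == i)

-- the inner j-loop with its break
def pvAntiInner (T : List (Int × Int × Int)) (p : List Int) (i : Int) : List Int → Bool
  | [] => true
  | j :: js =>
    if i != j then
      if pvTget T i j != pvTget T (pvIdx p j) (pvIdx p i) then false
      else pvAntiInner T p i js
    else pvAntiInner T p i js

-- the outer i-loop with the is_anti flag and its break
def pvAntiOuter (T : List (Int × Int × Int)) (p : List Int) (n : Int) : List Int → Bool
  | [] => true
  | i :: is =>
    if pvAntiInner T p i (PySem.List.pyRange 0 n 1) then pvAntiOuter T p n is else false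

def find_involution_anti_auts (T : List (Int × Int × Int)) (n : Int) : List (List Int) :=
  (pvPerms (PySem.List.pyRange 0 n 1)).foldl
    (fun results perm =>
      if !(pvInvoChk perm (PySem.List.pyRange 0 n 1)) then results
      else if pvAntiOuter T perm n (PySem.List.pyRange 0 n 1) then results ++ [perm]
      else results) []

-- ===== PORT B =====
-- _insert_by_key: insert a pair into a key-sorted association list
def pvInsertByKey (pair : Int × Int) : List (Int × Int) → List (Int × Int)
  | [] => [pair]
  | q :: m => if pair.1 < q.1 then pair :: q :: m else q :: pvInsertByKey pair m

-- _gen_involutions: every involution of the free index list as a key-sorted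
-- association list; smallest index i paired with i first, then with each larger
-- partner v in increasing order (free always has distinct elements, so removing
-- the chosen partner is List.erase).
def pvGenInvolutions : List Int → List (List (Int × Int))
  | [] => [[]]
  | i :: rest =>
    ((pvGenInvolutions rest).map (fun sub => (i, i) :: sub)) ++
    rest.flatMap (fun v =>
      (pvGenInvolutions (rest.erase v)).map
        (fun sub => (i, v) :: pvInsertByKey (v, i) sub))
termination_by l => l.length
decreasing_by
  · simp
  · have := List.length_erase_le (a := v) (l := rest); simp; omega

-- all(T.get((a,b),0) == T.get((p[b],p[a]),0) for a in range(n) for b in range(n) if a != b)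
def pvAntiAll (T : List (Int × Int × Int)) (p : List Int) (n : Int) : Bool :=
  (PySem.List.pyRange 0 n 1).all (fun a =>
    (PySem.List.pyRange 0 n 1).all (fun b =>
      a == b || pvTget T a b == pvTget T (pvIdx p b) (pvIdx p a)))

def find_involution_anti_auts_alt (T : List (Int × Int × Int)) (n : Int) : List (List Int) :=
  (pvGenInvolutions (PySem.List.pyRange 0 n 1)).foldl
    (fun results m =>
      if pvAntiAll T (m.map (fun q => q.2)) n then results ++ [m.map (fun q => q.2)]
      else results) []

-- ===== PRECONDITION & SPEC =====
def Spec_find_involution_anti_auts (T : List (Int × Int × Int)) (n : Int) (out : List (List Int)) : Prop := out = find_involution_anti_auts_alt T n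
instance (T : List (Int × Int × Int)) (n : Int) (out : List (List Int)) : Decidable (Spec_find_involution_anti_auts T n out) := by unfold Spec_find_involution_anti_auts; infer_instance

-- ===== CLAIM (what is proved, stated in full; the proofs are below) =====
def Claim_equal_find_involution_anti_auts : Prop := ∀ (T : List (Int × Int × Int)) (n : Int), Dom_find_involution_anti_auts T n → Spec_find_involution_anti_auts T n (find_involution_anti_auts T n)

-- ===== LEMMAS AND PROOFS =====

-- readout of an association list
def pvVals (m : List (Int × Int)) : List Int := m.map (fun q => q.2)
def pvKeys (m : List (Int × Int)) : List Int := m.map (fun q => q.1)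

-- the abstract object both programs enumerate: an involution of F as a key-list
def pvIsInvAssoc (F : List Int) (m : List (Int × Int)) : Prop :=
  pvKeys m = F ∧ ∀ q ∈ m, (q.2, q.1) ∈ m

-- ---- loop-shape lemmas ----
theorem pvAntiInner_eq_all (T : List (Int × Int × Int)) (p : List Int) (i : Int) (js : List Int) :
    pvAntiInner T p i js =
      js.all (fun j => i == j || pvTget T i j == pvTget T (pvIdx p j) (pvIdx p i)) := by
  induction js with
  | nil => rfl
  | cons j js ih =>
    by_cases h : i = j
    · subst h
      simp only [pvAntiInner, List.all_cons]
      simp [ih]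
    · simp only [pvAntiInner, List.all_cons]
      by_cases h2 : pvTget T i j = pvTget T (pvIdx p j) (pvIdx p i)
      · simp [h, h2, ih]
      · simp [h, h2]

theorem pvAntiOuter_eq_all (T : List (Int × Int × Int)) (p : List Int) (n : Int) (is : List Int) :
    pvAntiOuter T p n is =
      is.all (fun i => pvAntiInner T p i (PySem.List.pyRange 0 n 1)) := by
  induction is with
  | nil => rfl
  | cons i is ih =>
    simp only [pvAntiOuter, List.all_cons]
    by_cases h : pvAntiInner T p i (PySem.List.pyRange 0 n 1) = true
    · simp [h, ih]
    · simp [h]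

theorem pvAnti_eq (T : List (Int × Int × Int)) (p : List Int) (n : Int) :
    pvAntiOuter T p n (PySem.List.pyRange 0 n 1) = pvAntiAll T p n := by
  rw [pvAntiOuter_eq_all]
  unfold pvAntiAll
  simp only [pvAntiInner_eq_all]

theorem A_eq_filter (T : List (Int × Int × Int)) (n : Int) :
    find_involution_anti_auts T n =
      ((pvPerms (PySem.List.pyRange 0 n 1)).filter
          (fun p => pvInvoChk p (PySem.List.pyRange 0 n 1))).filter
        (fun p => pvAntiAll T p n) := by
  unfold find_involution_anti_auts
  have hf : (fun (results : List (List Int)) perm =>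
      if !(pvInvoChk perm (PySem.List.pyRange 0 n 1)) then results
      else if pvAntiOuter T perm n (PySem.List.pyRange 0 n 1) then results ++ [perm]
      else results)
    = fun results perm =>
        if (pvInvoChk perm (PySem.List.pyRange 0 n 1) && pvAntiAll T perm n) = true then
          results ++ [perm] else results := by
    funext results perm
    rw [← pvAnti_eq T perm n]
    cases h1 : pvInvoChk perm (PySem.List.pyRange 0 n 1) <;>
      cases h2 : pvAntiOuter T perm n (PySem.List.pyRange 0 n 1) <;> simp
  rw [hf, PySem.List.foldl_append_if_eq_filter, List.nil_append, List.filter_filter]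
  exact List.filter_congr (fun x _ => by rw [Bool.and_comm])

theorem B_eq_filter (T : List (Int × Int × Int)) (n : Int) :
    find_involution_anti_auts_alt T n =
      ((pvGenInvolutions (PySem.List.pyRange 0 n 1)).map pvVals).filter
        (fun p => pvAntiAll T p n) := by
  unfold find_involution_anti_auts_alt
  rw [List.filter_map]
  exact PySem.List.foldl_append_if
    (fun m => pvAntiAll T (pvVals m) n) pvVals (pvGenInvolutions (PySem.List.pyRange 0 n 1)) []

-- ---- insertByKey bookkeeping ----
def pvKins (v : Int) : List Int → List Int
  | [] => [v]
  | k :: ks => if v < k then v :: k :: ks else k :: pvKins v ks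

theorem pvKeys_insertByKey (q : Int × Int) (m : List (Int × Int)) :
    pvKeys (pvInsertByKey q m) = pvKins q.1 (pvKeys m) := by
  induction m with
  | nil => rfl
  | cons a m ih =>
    simp only [pvInsertByKey, pvKins, pvKeys, List.map_cons]
    by_cases h : q.1 < a.1
    · simp [h]
    · simp only [pvKeys] at ih
      simp [h, ih]

theorem pvKins_erase {F : List Int} (hF : F.Pairwise (· < ·)) {v : Int} (hv : v ∈ F) :
    pvKins v (F.erase v) = F := by
  induction F with
  | nil => cases hv
  | cons k ks ih =>
    rcases List.mem_cons.mp hv with h | h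
    · subst h
      rw [List.erase_cons_head]
      cases ks with
      | nil => rfl
      | cons k2 ks2 =>
        have hk2 : v < k2 := (List.pairwise_cons.mp hF).1 k2 (List.mem_cons_self)
        simp [pvKins, hk2]
    · have hkv : k < v := (List.pairwise_cons.mp hF).1 v h
      have hne : v ≠ k := fun he => absurd (he ▸ hkv) (lt_irrefl _)
      rw [List.erase_cons_tail (by simpa using fun he => hne he.symm)]
      simp only [pvKins, if_neg (not_lt.mpr (le_of_lt hkv))]
      rw [ih (List.pairwise_cons.mp hF).2 h]

theorem pvMem_insertByKey {q r : Int × Int} {m : List (Int × Int)} :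
    r ∈ pvInsertByKey q m ↔ r = q ∨ r ∈ m := by
  induction m with
  | nil => simp [pvInsertByKey]
  | cons a m ih =>
    simp only [pvInsertByKey]
    by_cases h : q.1 < a.1
    · simp [h]
    · simp only [if_neg h, List.mem_cons, ih]
      tauto

theorem pvInsertByKey_erase {m : List (Int × Int)} (hs : (pvKeys m).Pairwise (· < ·))
    {v i : Int} (hm : (v, i) ∈ m) :
    pvInsertByKey (v, i) (m.erase (v, i)) = m := by
  induction m with
  | nil => cases hm
  | cons a m ih =>
    have hs' : List.Pairwise (· < ·) (a.1 :: pvKeys m) := by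
      simpa only [pvKeys, List.map_cons] using hs
    by_cases ha : a = (v, i)
    · subst ha
      rw [List.erase_cons_head]
      cases m with
      | nil => rfl
      | cons b m2 =>
        have hb : (v, i).1 < b.1 :=
          (List.pairwise_cons.mp hs').1 b.1 (by simp [pvKeys])
        simp [pvInsertByKey, hb]
    · have hm' : (v, i) ∈ m := by
        rcases List.mem_cons.mp hm with h | h
        · exact absurd h.symm ha
        · exact h
      have hav : a.1 < v :=
        (List.pairwise_cons.mp hs').1 v (by unfold pvKeys; exact List.mem_map_of_mem hm')
      rw [List.erase_cons_tail (by simpa using fun he => ha he)]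
      simp only [pvInsertByKey, if_neg (not_lt.mpr (le_of_lt hav))]
      rw [ih (by simpa only [pvKeys] using (List.pairwise_cons.mp hs').2) hm']

theorem pvKeys_erase {m : List (Int × Int)} (hnd : (pvKeys m).Nodup)
    {v i : Int} (hm : (v, i) ∈ m) :
    pvKeys (m.erase (v, i)) = (pvKeys m).erase v := by
  induction m with
  | nil => cases hm
  | cons a m ih =>
    by_cases ha : a = (v, i)
    · subst ha
      rw [List.erase_cons_head]
      simp only [pvKeys, List.map_cons, List.erase_cons_head]
    · have hm' : (v, i) ∈ m := by
        rcases List.mem_cons.mp hm with h | h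
        · exact absurd h.symm ha
        · exact h
      have hnd' : (a.1 :: pvKeys m).Nodup := by
        simpa only [pvKeys, List.map_cons] using hnd
      have hav : a.1 ≠ v := by
        intro he
        have h1 : v ∈ pvKeys m := by
          unfold pvKeys; exact List.mem_map_of_mem hm'
        exact (List.nodup_cons.mp hnd').1 (he ▸ h1)
      rw [List.erase_cons_tail (by simpa using fun he => ha he)]
      simp only [pvKeys, List.map_cons]
      rw [List.erase_cons_tail (by simpa using hav)]
      have := ih (by simpa only [pvKeys] using (List.nodup_cons.mp hnd').2) hm'
      simp only [pvKeys] at this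
      rw [this]

-- ---- membership characterizations ----
theorem pvPerms_mem : ∀ (l p : List Int), p ∈ pvPerms l ↔ p.Perm l := by
  have key : ∀ (N : Nat) (l : List Int), l.length ≤ N → ∀ p, (p ∈ pvPerms l ↔ p.Perm l) := by
    intro N
    induction N with
    | zero =>
      intro l hl p
      have : l = [] := List.length_eq_zero_iff.mp (Nat.le_zero.mp hl)
      subst this
      simp [pvPerms, List.perm_nil]
    | succ N ih =>
      intro l hl p
      cases l with
      | nil => simp [pvPerms, List.perm_nil]
      | cons x t =>
        constructor
        · intro hp
          simp only [pvPerms, List.mem_flatMap, List.mem_map] at hp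
          obtain ⟨y, _, q, hq, rfl⟩ := hp
          have hql : ((x :: t).erase y.1).length ≤ N := by
            rw [List.length_erase_of_mem y.2]
            simpa using Nat.le_of_succ_le_succ hl
          have hperm := (ih _ hql q).mp hq
          exact List.cons_perm_iff_perm_erase.mpr ⟨y.2, hperm⟩
        · intro hp
          cases p with
          | nil => exact absurd (List.perm_nil.mp hp.symm) (by simp)
          | cons y q =>
            obtain ⟨hy, hq⟩ := List.cons_perm_iff_perm_erase.mp hp
            have hql : ((x :: t).erase y).length ≤ N := by
              rw [List.length_erase_of_mem hy]
              simpa using Nat.le_of_succ_le_succ hl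
            simp only [pvPerms, List.mem_flatMap, List.mem_map]
            exact ⟨⟨y, hy⟩, List.mem_attach _ _, q, (ih _ hql q).mpr hq, rfl⟩
  intro l p
  exact key l.length l (le_refl _) p

theorem pvGen_mem : ∀ (F : List Int), F.Pairwise (· < ·) →
    ∀ m, m ∈ pvGenInvolutions F ↔ pvIsInvAssoc F m := by
  have key : ∀ (N : Nat) (F : List Int), F.length ≤ N → F.Pairwise (· < ·) →
      ∀ m, m ∈ pvGenInvolutions F ↔ pvIsInvAssoc F m := by
    intro N
    induction N with
    | zero =>
      intro F hF _ m
      have : F = [] := List.length_eq_zero_iff.mp (Nat.le_zero.mp hF)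
      subst this
      constructor
      · intro h
        simp only [pvGenInvolutions, List.mem_singleton] at h
        subst h
        exact ⟨rfl, by simp⟩
      · rintro ⟨hk, -⟩
        have : m = [] := by
          cases m with
          | nil => rfl
          | cons a m' => simp [pvKeys] at hk
        simp [this, pvGenInvolutions]
    | succ N ih =>
      intro F hF hsor m
      cases F with
      | nil =>
        constructor
        · intro h
          simp only [pvGenInvolutions, List.mem_singleton] at h
          subst h
          exact ⟨rfl, by simp⟩
        · rintro ⟨hk, -⟩
          have : m = [] := by
            cases m with
            | nil => rfl
            | cons a m' => simp [pvKeys] at hk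
          simp [this, pvGenInvolutions]
      | cons i rest =>
        have hsor' := List.pairwise_cons.mp hsor
        have hi_not : i ∉ rest := fun h => absurd (hsor'.1 i h) (lt_irrefl i)
        have hrest_len : rest.length ≤ N := by simpa using Nat.le_of_succ_le_succ hF
        have hrest_nd : rest.Nodup := hsor'.2.nodup
        have hmem_unfold : m ∈ pvGenInvolutions (i :: rest) ↔
            (∃ sub ∈ pvGenInvolutions rest, m = (i, i) :: sub) ∨
            (∃ v ∈ rest, ∃ sub ∈ pvGenInvolutions (rest.erase v),
              m = (i, v) :: pvInsertByKey (v, i) sub) := by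
          simp only [pvGenInvolutions, List.mem_append, List.mem_map, List.mem_flatMap]
          constructor
          · rintro (⟨sub, hs, rfl⟩ | ⟨v, hv, sub, hs, rfl⟩)
            · exact Or.inl ⟨sub, hs, rfl⟩
            · exact Or.inr ⟨v, hv, sub, hs, rfl⟩
          · rintro (⟨sub, hs, rfl⟩ | ⟨v, hv, sub, hs, rfl⟩)
            · exact Or.inl ⟨sub, hs, rfl⟩
            · exact Or.inr ⟨v, hv, sub, hs, rfl⟩
        rw [hmem_unfold]
        constructor
        · rintro (⟨sub, hs, rfl⟩ | ⟨v, hv, sub, hs, rfl⟩)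
          · -- fixed-point branch
            obtain ⟨hk, hc⟩ := (ih rest hrest_len hsor'.2 sub).mp hs
            refine ⟨by simp [pvKeys, List.map_cons]; exact hk, ?_⟩
            intro q hq
            rcases List.mem_cons.mp hq with rfl | hq'
            · exact List.mem_cons_self
            · exact List.mem_cons_of_mem _ (hc q hq')
          · -- pairing branch
            have hvne : v ≠ i := fun h => hi_not (h ▸ hv)
            have herase_sor : (rest.erase v).Pairwise (· < ·) :=
              List.Pairwise.sublist List.erase_sublist hsor'.2
            have herase_len : (rest.erase v).length ≤ N :=
              le_trans List.length_erase_le hrest_len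
            obtain ⟨hk, hc⟩ := (ih _ herase_len herase_sor sub).mp hs
            have hkeys : pvKeys ((i, v) :: pvInsertByKey (v, i) sub) = i :: rest := by
              simp only [pvKeys, List.map_cons]
              have := pvKeys_insertByKey (v, i) sub
              simp only [pvKeys] at this hk
              rw [this, hk, pvKins_erase hsor'.2 hv]
            refine ⟨hkeys, ?_⟩
            intro q hq
            rcases List.mem_cons.mp hq with rfl | hq'
            · exact List.mem_cons_of_mem _ (pvMem_insertByKey.mpr (Or.inl rfl))
            · rcases pvMem_insertByKey.mp hq' with rfl | hq''
              · exact List.mem_cons_self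
              · exact List.mem_cons_of_mem _ (pvMem_insertByKey.mpr (Or.inr (hc q hq'')))
        · rintro ⟨hk, hc⟩
          cases m with
          | nil => simp [pvKeys] at hk
          | cons q m' =>
            obtain ⟨b, rfl⟩ : ∃ b, q = (i, b) := by
              have : q.1 = i := by
                simp only [pvKeys, List.map_cons, List.cons.injEq] at hk
                exact hk.1
              exact ⟨q.2, by rw [← this]⟩
            have hk' : pvKeys m' = rest := by
              simp only [pvKeys, List.map_cons, List.cons.injEq] at hk
              exact hk.2
            have hm'_keys_nd : (pvKeys m').Nodup := hk' ▸ hrest_nd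
            have hkey_mem : ∀ r ∈ m', r.1 ∈ rest := by
              intro r hr
              rw [← hk']
              exact List.mem_map_of_mem hr
            by_cases hb : b = i
            · subst hb
              left
              refine ⟨m', ?_, rfl⟩
              refine (ih rest hrest_len hsor'.2 m').mpr ⟨hk', ?_⟩
              intro r hr
              have := hc r (List.mem_cons_of_mem _ hr)
              rcases List.mem_cons.mp this with he | h'
              · exfalso
                have : r.1 = b := by
                  have := congrArg Prod.snd he
                  simpa using this
                exact hi_not (this ▸ hkey_mem r hr)
              · exact h'
            · right
              have hbv : (b, i) ∈ (i, b) :: m' := hc (i, b) List.mem_cons_self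
              have hbm' : (b, i) ∈ m' := by
                rcases List.mem_cons.mp hbv with he | h'
                · exact absurd (congrArg Prod.fst he) (by simpa using hb)
                · exact h'
              have hbrest : b ∈ rest := by
                have := hkey_mem (b, i) hbm'
                simpa using this
              refine ⟨b, hbrest, m'.erase (b, i), ?_, ?_⟩
              · have hkeys_erase : pvKeys (m'.erase (b, i)) = rest.erase b := by
                  rw [pvKeys_erase hm'_keys_nd hbm', hk']
                have herase_sor : (rest.erase b).Pairwise (· < ·) :=
                  List.Pairwise.sublist List.erase_sublist hsor'.2
                have herase_len : (rest.erase b).length ≤ N :=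
                  le_trans List.length_erase_le hrest_len
                refine (ih _ herase_len herase_sor _).mpr ⟨hkeys_erase, ?_⟩
                intro r hr
                have hm'_nd : m'.Nodup := List.Nodup.of_map _ hm'_keys_nd
                have hrm' : r ∈ m' := (List.Nodup.mem_erase_iff hm'_nd).mp hr |>.2
                have hrne : r ≠ (b, i) := (List.Nodup.mem_erase_iff hm'_nd).mp hr |>.1
                have := hc r (List.mem_cons_of_mem _ hrm')
                rcases List.mem_cons.mp this with he | h'
                · exfalso
                  have h1 : r.2 = i := by simpa using congrArg Prod.fst he
                  have h2 : r.1 = b := by simpa using congrArg Prod.snd he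
                  exact hrne (by rw [← h1, ← h2])
                · refine (List.Nodup.mem_erase_iff hm'_nd).mpr ⟨?_, h'⟩
                  intro he
                  have h1 : r.2 = b := by simpa using congrArg Prod.fst he
                  have h2 : r.1 = i := by simpa using congrArg Prod.snd he
                  exact hi_not (h2 ▸ hkey_mem r hrm')
              · have hsorted_m' : (pvKeys m').Pairwise (· < ·) := hk' ▸ hsor'.2
                rw [pvInsertByKey_erase hsorted_m' hbm']
  intro F hsor m
  exact key F.length F (le_refl _) hsor m

-- ---- lexicographic order ----
theorem pvLex_irrefl : ∀ (p : List Int), ¬ List.Lex (· < ·) p p := by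
  intro p
  induction p with
  | nil => intro h; cases h
  | cons a p ih =>
    intro h
    cases h with
    | rel h' => exact absurd h' (lt_irrefl a)
    | cons h' => exact ih h'

theorem pvLex_asymm : ∀ {p q : List Int}, List.Lex (· < ·) p q → ¬ List.Lex (· < ·) q p := by
  intro p q h1
  induction h1 with
  | nil => intro h2; cases h2
  | @rel a l1 b l2 h =>
    intro h2
    cases h2 with
    | rel h' => exact absurd h (asymm h')
    | cons h' => exact absurd h (lt_irrefl _)
  | @cons a l1 l2 h ih =>
    intro h2
    cases h2 with
    | rel h' => exact absurd h' (lt_irrefl _)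
    | cons h' => exact ih h'

theorem pvLex_tri : ∀ (p q : List Int), p = q ∨ List.Lex (· < ·) p q ∨ List.Lex (· < ·) q p := by
  intro p
  induction p with
  | nil =>
    intro q
    cases q with
    | nil => exact Or.inl rfl
    | cons b q => exact Or.inr (Or.inl List.Lex.nil)
  | cons a p ih =>
    intro q
    cases q with
    | nil => exact Or.inr (Or.inr List.Lex.nil)
    | cons b q =>
      rcases lt_trichotomy a b with h | h | h
      · exact Or.inr (Or.inl (List.Lex.rel h))
      · subst h
        rcases ih q with h2 | h2 | h2
        · exact Or.inl (by rw [h2])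
        · exact Or.inr (Or.inl (List.Lex.cons h2))
        · exact Or.inr (Or.inr (List.Lex.cons h2))
      · exact Or.inr (Or.inr (List.Lex.rel h))

theorem pvSorted_ext : ∀ (P Q : List (List Int)),
    P.Pairwise (List.Lex (· < ·)) → Q.Pairwise (List.Lex (· < ·)) →
    (∀ x, x ∈ P ↔ x ∈ Q) → P = Q := by
  intro P
  induction P with
  | nil =>
    intro Q _ _ hmem
    cases Q with
    | nil => rfl
    | cons b Q' => exact absurd ((hmem b).mpr List.mem_cons_self) (List.not_mem_nil)
  | cons a P' ih =>
    intro Q hP hQ hmem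
    cases Q with
    | nil => exact absurd ((hmem a).mp List.mem_cons_self) (List.not_mem_nil)
    | cons b Q' =>
      have hab : a = b := by
        rcases pvLex_tri a b with h | h | h
        · exact h
        · rcases List.mem_cons.mp ((hmem a).mp List.mem_cons_self) with h2 | h2
          · exact h2
          · exact absurd ((List.pairwise_cons.mp hQ).1 a h2) (pvLex_asymm h)
        · rcases List.mem_cons.mp ((hmem b).mpr List.mem_cons_self) with h2 | h2
          · exact h2.symm
          · exact absurd ((List.pairwise_cons.mp hP).1 b h2) (pvLex_asymm h)
      subst hab
      have htail : ∀ x, x ∈ P' ↔ x ∈ Q' := by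
        intro x
        constructor
        · intro hx
          rcases List.mem_cons.mp ((hmem x).mp (List.mem_cons_of_mem a hx)) with h2 | h2
          · exact absurd (h2 ▸ (List.pairwise_cons.mp hP).1 x hx) (pvLex_irrefl x)
          · exact h2
        · intro hx
          rcases List.mem_cons.mp ((hmem x).mpr (List.mem_cons_of_mem a hx)) with h2 | h2
          · exact absurd (h2 ▸ (List.pairwise_cons.mp hQ).1 x hx) (pvLex_irrefl x)
          · exact h2
      rw [ih Q' (List.pairwise_cons.mp hP).2 (List.pairwise_cons.mp hQ).2 htail]

theorem pvPerms_sorted : ∀ (l : List Int), l.Pairwise (· < ·) →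
    (pvPerms l).Pairwise (List.Lex (· < ·)) := by
  have key : ∀ (N : Nat) (l : List Int), l.length ≤ N → l.Pairwise (· < ·) →
      (pvPerms l).Pairwise (List.Lex (· < ·)) := by
    intro N
    induction N with
    | zero =>
      intro l hl _
      have : l = [] := List.length_eq_zero_iff.mp (Nat.le_zero.mp hl)
      subst this
      simp [pvPerms]
    | succ N ih =>
      intro l hl hsor
      cases l with
      | nil => simp [pvPerms]
      | cons x t =>
        rw [pvPerms, List.pairwise_flatMap]
        constructor
        · intro y _
          rw [List.pairwise_map]
          have hlen : ((x :: t).erase y.1).length ≤ N := by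
            rw [List.length_erase_of_mem y.2]
            simpa using Nat.le_of_succ_le_succ hl
          have hsor' : ((x :: t).erase y.1).Pairwise (· < ·) :=
            List.Pairwise.sublist List.erase_sublist hsor
          exact (ih _ hlen hsor').imp (fun h => List.Lex.cons h)
        · have hat : ((x :: t).attach).Pairwise (fun a b => a.1 < b.1) := by
            have h := hsor
            rw [← List.attach_map_subtype_val (x :: t), List.pairwise_map] at h
            exact h
          refine hat.imp ?_
          intro a b hab p hp p' hp'
          obtain ⟨q, _, rfl⟩ := List.mem_map.mp hp
          obtain ⟨q', _, rfl⟩ := List.mem_map.mp hp'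
          exact List.Lex.rel hab
  intro l hsor
  exact key l.length l (le_refl _) hsor

theorem pvIns_lex (v i : Int) :
    ∀ (t t' : List (Int × Int)), pvKeys t = pvKeys t' →
      List.Lex (· < ·) (pvVals t) (pvVals t') →
      List.Lex (· < ·) (pvVals (pvInsertByKey (v, i) t)) (pvVals (pvInsertByKey (v, i) t')) := by
  intro t
  induction t with
  | nil =>
    intro t' hk hlex
    cases t' with
    | nil => exact absurd hlex (pvLex_irrefl [])
    | cons b t2 => simp [pvKeys] at hk
  | cons a t2 ih =>
    intro t' hk hlex
    cases t' with
    | nil => simp [pvKeys] at hk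
    | cons b t2' =>
      simp only [pvKeys, List.map_cons, List.cons.injEq] at hk
      simp only [pvInsertByKey]
      by_cases h : (v, i).1 < a.1
      · rw [if_pos h, if_pos (hk.1 ▸ h)]
        simp only [pvVals, List.map_cons]
        exact List.Lex.cons hlex
      · rw [if_neg h, if_neg (hk.1 ▸ h)]
        simp only [pvVals, List.map_cons]
        simp only [pvVals, List.map_cons] at hlex
        revert hlex
        generalize a.2 = va
        generalize b.2 = vb
        intro hlex
        cases hlex with
        | rel h' => exact List.Lex.rel h'
        | cons h' =>
          refine List.Lex.cons ?_
          have := ih t2' (by simp only [pvKeys]; exact hk.2) (by simpa [pvVals] using h')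
          simpa [pvVals] using this

theorem pvGen_sorted : ∀ (F : List Int), F.Pairwise (· < ·) →
    ((pvGenInvolutions F).map pvVals).Pairwise (List.Lex (· < ·)) := by
  have key : ∀ (N : Nat) (F : List Int), F.length ≤ N → F.Pairwise (· < ·) →
      ((pvGenInvolutions F).map pvVals).Pairwise (List.Lex (· < ·)) := by
    intro N
    induction N with
    | zero =>
      intro F hF _
      have : F = [] := List.length_eq_zero_iff.mp (Nat.le_zero.mp hF)
      subst this
      simp [pvGenInvolutions]
    | succ N ih =>
      intro F hF hsor
      cases F with
      | nil => simp [pvGenInvolutions]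
      | cons i rest =>
        have hsor' := List.pairwise_cons.mp hsor
        have hrest_len : rest.length ≤ N := by simpa using Nat.le_of_succ_le_succ hF
        rw [pvGenInvolutions, List.map_append, List.pairwise_append]
        refine ⟨?_, ?_, ?_⟩
        · -- fixed-point block
          rw [List.map_map, List.pairwise_map]
          have h := ih rest hrest_len hsor'.2
          rw [List.pairwise_map] at h
          refine h.imp ?_
          intro s s' hss
          show List.Lex (· < ·) (pvVals ((i, i) :: s)) (pvVals ((i, i) :: s'))
          simp only [pvVals, List.map_cons]
          exact List.Lex.cons hss
        · -- pairing blocks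
          rw [List.map_flatMap, List.pairwise_flatMap]
          constructor
          · intro v hv
            rw [List.map_map, List.pairwise_map]
            have herase_sor : (rest.erase v).Pairwise (· < ·) :=
              List.Pairwise.sublist List.erase_sublist hsor'.2
            have herase_len : (rest.erase v).length ≤ N :=
              le_trans List.length_erase_le hrest_len
            have h := ih _ herase_len herase_sor
            rw [List.pairwise_map] at h
            refine List.Pairwise.imp_of_mem ?_ h
            intro s s' hs hs' hss
            show List.Lex (· < ·) (pvVals ((i, v) :: pvInsertByKey (v, i) s))
              (pvVals ((i, v) :: pvInsertByKey (v, i) s'))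
            simp only [pvVals, List.map_cons]
            refine List.Lex.cons ?_
            have hks : pvKeys s = rest.erase v :=
              ((pvGen_mem _ herase_sor s).mp hs).1
            have hks' : pvKeys s' = rest.erase v :=
              ((pvGen_mem _ herase_sor s').mp hs').1
            exact pvIns_lex v i s s' (hks.trans hks'.symm) hss
          · refine hsor'.2.imp ?_
            intro v v' hvv p hp p' hp'
            simp only [List.map_map, List.mem_map] at hp hp'
            obtain ⟨s, _, rfl⟩ := hp
            obtain ⟨s', _, rfl⟩ := hp'
            show List.Lex (· < ·) (pvVals ((i, v) :: pvInsertByKey (v, i) s))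
              (pvVals ((i, v') :: pvInsertByKey (v', i) s'))
            simp only [pvVals, List.map_cons]
            exact List.Lex.rel hvv
        · -- across the two groups
          intro p hp p' hp'
          rw [List.map_map, List.mem_map] at hp
          obtain ⟨s, _, rfl⟩ := hp
          rw [List.map_flatMap, List.mem_flatMap] at hp'
          obtain ⟨v, hv, hp'⟩ := hp'
          rw [List.map_map, List.mem_map] at hp'
          obtain ⟨s', _, rfl⟩ := hp'
          show List.Lex (· < ·) (pvVals ((i, i) :: s))
            (pvVals ((i, v) :: pvInsertByKey (v, i) s'))
          simp only [pvVals, List.map_cons]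
          exact List.Lex.rel (hsor'.1 v hv)
  intro F hsor
  exact key F.length F (le_refl _) hsor

-- ---- bridge between index form and association form ----
theorem pvZip_self (m : List (Int × Int)) : m = (pvKeys m).zip (pvVals m) := by
  induction m with
  | nil => rfl
  | cons a m ih =>
    simp only [pvKeys, pvVals, List.map_cons, List.zip_cons_cons]
    simp only [pvKeys, pvVals] at ih
    rw [← ih]

theorem pvMemZipR (n : Int) (p : List Int)
    (hlen : p.length = (PySem.List.pyRange 0 n 1).length) (a b : Int) :
    (a, b) ∈ (PySem.List.pyRange 0 n 1).zip p ↔ 0 ≤ a ∧ a < n ∧ pvIdx p a = b := by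
  have hRlen : (PySem.List.pyRange 0 n 1).length = n.toNat := by
    rw [PySem.List.length_pyRange_one]; simp
  constructor
  · intro h
    obtain ⟨k, hk, he⟩ := List.mem_iff_getElem.mp h
    have hk' : k < n.toNat := by
      rw [List.length_zip, hlen, hRlen] at hk
      omega
    rw [List.getElem_zip] at he
    have hR : (PySem.List.pyRange 0 n 1)[k]'(by rw [hRlen]; exact hk') = (k : Int) := by
      rw [PySem.List.getElem_pyRange_one]; ring
    have ha : a = (k : Int) := by
      have := congrArg Prod.fst he
      simp only at this
      rw [← this, hR]
    have hb : p[k]'(by rw [hlen, hRlen]; exact hk') = b := by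
      have := congrArg Prod.snd he
      simpa using this
    refine ⟨by omega, by omega, ?_⟩
    rw [ha]
    unfold pvIdx
    rw [PySem.List.pyGetD_eq_getElem p 0 (by omega) (by rw [hlen, hRlen]; exact_mod_cast by omega)]
    simpa using hb
  · rintro ⟨h0, h1, h2⟩
    have hk' : a.toNat < n.toNat := by omega
    have hkz : a.toNat < ((PySem.List.pyRange 0 n 1).zip p).length := by
      rw [List.length_zip, hlen, hRlen]; omega
    refine List.mem_iff_getElem.mpr ⟨a.toNat, hkz, ?_⟩
    rw [List.getElem_zip]
    have hR : (PySem.List.pyRange 0 n 1)[a.toNat]'(by rw [hRlen]; exact hk') = a := by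
      rw [PySem.List.getElem_pyRange_one]; omega
    have hp : p[a.toNat]'(by rw [hlen, hRlen]; exact hk') = b := by
      rw [← h2]
      unfold pvIdx
      rw [PySem.List.pyGetD_eq_getElem p 0 h0 (by rw [hlen, hRlen]; exact_mod_cast by omega)]
    rw [hR, hp]

theorem pvBridge (n : Int) (p : List Int) :
    (p.Perm (PySem.List.pyRange 0 n 1) ∧ pvInvoChk p (PySem.List.pyRange 0 n 1) = true) ↔
    (∃ m ∈ pvGenInvolutions (PySem.List.pyRange 0 n 1), pvVals m = p) := by
  have hsorR : (PySem.List.pyRange 0 n 1).Pairwise (· < ·) :=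
    PySem.List.pairwise_lt_pyRange_one 0 n
  constructor
  · rintro ⟨hperm, hinvo⟩
    have hlen : p.length = (PySem.List.pyRange 0 n 1).length := hperm.length_eq
    have hinvo' : ∀ x ∈ PySem.List.pyRange 0 n 1, pvIdx p (pvIdx p x) = x := by
      intro x hx
      have := List.all_eq_true.mp hinvo x hx
      simpa using this
    refine ⟨(PySem.List.pyRange 0 n 1).zip p, ?_, ?_⟩
    · refine (pvGen_mem _ hsorR _).mpr ⟨?_, ?_⟩
      · unfold pvKeys
        exact List.map_fst_zip (le_of_eq hlen.symm)
      · rintro ⟨a, b⟩ hq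
        obtain ⟨h0, h1, h2⟩ := (pvMemZipR n p hlen a b).mp hq
        have hbp : b ∈ p := by
          rw [← h2]
          unfold pvIdx
          refine PySem.List.pyGetD_mem p 0 ⟨by omega, ?_⟩
          rw [hlen, PySem.List.length_pyRange_one]
          omega
        have hbR := hperm.mem_iff.mp hbp
        obtain ⟨hb0, hbn⟩ := PySem.List.mem_pyRange_one.mp hbR
        refine (pvMemZipR n p hlen b a).mpr ⟨hb0, hbn, ?_⟩
        have := hinvo' a (PySem.List.mem_pyRange_one.mpr ⟨h0, h1⟩)
        rw [h2] at this
        exact this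
    · unfold pvVals
      exact List.map_snd_zip (le_of_eq hlen)
  · rintro ⟨m, hm, rfl⟩
    obtain ⟨hk, hc⟩ := (pvGen_mem _ hsorR m).mp hm
    have hlen : (pvVals m).length = (PySem.List.pyRange 0 n 1).length := by
      rw [← hk]
      simp [pvKeys, pvVals]
    have hzip : m = (PySem.List.pyRange 0 n 1).zip (pvVals m) := by
      conv_lhs => rw [pvZip_self m]
      rw [hk]
    have hnodupK : (pvKeys m).Nodup := hk ▸ PySem.List.nodup_pyRange_one 0 n
    have hndm : m.Nodup := List.Nodup.of_map _ hnodupK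
    have hsub : m.map Prod.swap ⊆ m := by
      intro x hx
      obtain ⟨q, hq, rfl⟩ := List.mem_map.mp hx
      exact hc q hq
    have hndswap : (m.map Prod.swap).Nodup := hndm.map Prod.swap_injective
    have hpermswap : (m.map Prod.swap).Perm m :=
      (List.subperm_of_subset hndswap hsub).perm_of_length_le (by simp)
    have hPerm : (pvVals m).Perm (PySem.List.pyRange 0 n 1) := by
      have h1 : (m.map Prod.swap).map Prod.fst = pvVals m := by
        rw [List.map_map]
        rfl
      have h2 := hpermswap.map Prod.fst
      rw [h1] at h2
      have h3 : m.map Prod.fst = PySem.List.pyRange 0 n 1 := hk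
      rw [h3] at h2
      exact h2
    refine ⟨hPerm, ?_⟩
    unfold pvInvoChk
    rw [List.all_eq_true]
    intro i hi
    obtain ⟨h0, h1⟩ := PySem.List.mem_pyRange_one.mp hi
    have hmem1 : (i, pvIdx (pvVals m) i) ∈ (PySem.List.pyRange 0 n 1).zip (pvVals m) :=
      (pvMemZipR n (pvVals m) hlen i _).mpr ⟨h0, h1, rfl⟩
    rw [← hzip] at hmem1
    have hmem2 : (pvIdx (pvVals m) i, i) ∈ m := hc _ hmem1
    nth_rewrite 1 [hzip] at hmem2
    obtain ⟨_, _, h3⟩ := (pvMemZipR n (pvVals m) hlen _ i).mp hmem2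
    simpa using h3

-- ---- the core identity ----
theorem pvCore (n : Int) :
    (pvPerms (PySem.List.pyRange 0 n 1)).filter
        (fun p => pvInvoChk p (PySem.List.pyRange 0 n 1)) =
      (pvGenInvolutions (PySem.List.pyRange 0 n 1)).map pvVals := by
  apply pvSorted_ext
  · exact List.Pairwise.sublist List.filter_sublist
      (pvPerms_sorted _ (PySem.List.pairwise_lt_pyRange_one 0 n))
  · exact pvGen_sorted _ (PySem.List.pairwise_lt_pyRange_one 0 n)
  · intro x
    rw [List.mem_filter, pvPerms_mem, List.mem_map]
    constructor
    · rintro ⟨hperm, hinv⟩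
      obtain ⟨m, hm, hv⟩ := (pvBridge n x).mp ⟨hperm, hinv⟩
      exact ⟨m, hm, hv⟩
    · rintro ⟨m, hm, rfl⟩
      obtain ⟨h1, h2⟩ := (pvBridge n (pvVals m)).mpr ⟨m, hm, rfl⟩
      exact ⟨h1, h2⟩

-- ===== VERDICT (by name: the statement is the Claim_ definition above) =====
theorem find_involution_anti_auts_spec : Claim_equal_find_involution_anti_auts := by
  intro T n _
  unfold Spec_find_involution_anti_auts
  rw [A_eq_filter, B_eq_filter, pvCore]
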